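-- pv_equiv track=rewrite | github.com/AlexDarigan/mtg-rest | functions/services/preprocessor.py | extract_types
-- ===== SOURCE A (Python) =====
-- def extract_types(type_line, secondary):
--     # Splitting the primary card types (land, creature, artifact, enchantment, sorcery, instant)..
--     # ..from the secondary card types (saga, human, elf, dragon etc)
--     types = type_line.split(" ")
--     extracted = []
--     if secondary:
--         # Searching for secondary card types
--         types.reverse()
--     for t in types:
--         if len(t) == 1:
--             return extracted # Found "-"
--         extracted.append(t)
--     if secondary:
--         # If we found no seperator while searching secondary types,
--         # ..then there is no secondary types
--         return []
--     return extracted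
-- ===== SOURCE B (Python) =====
-- def extract_types(type_line, secondary):
--     types = type_line.split(" ")
--     seps = [i for i, t in enumerate(types) if len(t) == 1]
--     if secondary:
--         return [] if not seps else types[seps[-1] + 1:][::-1]
--     return types if not seps else types[:seps[0]]
-- ===== Notes on version B (the rewrite author's own statement) =====
-- stated objective: simpler
-- what changed: Replaces A's accumulate-until-separator loop (with a reversed copy for the secondary case) by computing the separator positions once with a comprehension and returning a slice: types[:first] for primary, reversed types[last+1:] for secondary.
import Mathlib
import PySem

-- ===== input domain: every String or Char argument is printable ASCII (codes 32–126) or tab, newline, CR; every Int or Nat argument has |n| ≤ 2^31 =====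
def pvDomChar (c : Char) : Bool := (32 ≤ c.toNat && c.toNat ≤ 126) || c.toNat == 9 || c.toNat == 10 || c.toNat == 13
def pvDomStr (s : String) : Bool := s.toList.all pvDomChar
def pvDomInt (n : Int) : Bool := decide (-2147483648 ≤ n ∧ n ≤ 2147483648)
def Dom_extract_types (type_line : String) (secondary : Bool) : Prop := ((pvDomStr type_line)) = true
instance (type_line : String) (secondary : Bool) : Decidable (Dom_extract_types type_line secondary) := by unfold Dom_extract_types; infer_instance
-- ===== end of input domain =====

-- B computes the separator positions once with a comprehension and slices, instead of A's accumulate-until-separator loop; objective: simpler.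

-- ===== PORT A =====
-- the for-loop of A: returns (found-separator?, extracted)
def extractTypesLoopA : List String → List String → Bool × List String
  | [], extracted => (false, extracted)
  | t :: rest, extracted =>
      if PySem.Str.len t = 1 then (true, extracted)
      else extractTypesLoopA rest (extracted ++ [t])

def extract_types (type_line : String) (secondary : Bool) : List String :=
  let types := (PySem.Str.split? type_line " ").getD []   -- sep = " " ≠ "", so split? is always some
  let types := if secondary then types.reverse else types
  match extractTypesLoopA types [] with
  | (true, extracted) => extracted
  | (false, extracted) => if secondary then [] else extracted

-- ===== PORT B =====
def extract_types_alt (type_line : String) (secondary : Bool) : List String :=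
  let types := (PySem.Str.split? type_line " ").getD []   -- sep = " " ≠ "", so split? is always some
  let seps := ((PySem.List.enumerate types).filter (fun p => decide (PySem.Str.len p.2 = 1))).map Prod.fst
  if secondary then
    match seps.getLast? with          -- seps[-1], guarded by "if not seps"
    | none => []
    | some i => (PySem.List.slice types (some (i + 1)) none).reverse   -- types[i+1:][::-1]
  else
    match seps.head? with             -- seps[0], guarded by "if not seps"
    | none => types
    | some i => PySem.List.slice types none (some i)                   -- types[:i]

-- ===== PRECONDITION & SPEC =====
def Spec_extract_types (type_line : String) (secondary : Bool) (out : List String) : Prop := out = extract_types_alt type_line secondary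
instance (type_line : String) (secondary : Bool) (out : List String) : Decidable (Spec_extract_types type_line secondary out) := by unfold Spec_extract_types; infer_instance

-- ===== CLAIM (what is proved, stated in full; the proofs are below) =====
def Claim_equal_extract_types : Prop := ∀ (type_line : String) (secondary : Bool), Dom_extract_types type_line secondary → Spec_extract_types type_line secondary (extract_types type_line secondary)

-- ===== LEMMAS AND PROOFS =====

lemma extractTypesLoopA_eq (ts : List String) : ∀ acc,
    extractTypesLoopA ts acc =
      match ts.findIdx? (fun t => decide (PySem.Str.len t = 1)) with
      | some i => (true, acc ++ ts.take i)
      | none => (false, acc ++ ts) := by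
  induction ts with
  | nil => intro acc; simp [extractTypesLoopA]
  | cons t rest ih =>
    intro acc
    rw [extractTypesLoopA, List.findIdx?_cons]
    by_cases h : PySem.Str.len t = 1
    · rw [if_pos h, if_pos (by simpa using h)]
      simp
    · rw [if_neg h, if_neg (by simpa using h), ih]
      cases hf : rest.findIdx? (fun t => decide (PySem.Str.len t = 1)) <;> simp

lemma seps_head (ts : List String) : ∀ s : Int,
    (((PySem.List.enumerate ts s).filter (fun p => decide (PySem.Str.len p.2 = 1))).map Prod.fst).head?
      = (ts.findIdx? (fun t => decide (PySem.Str.len t = 1))).map (fun i : Nat => s + (i : Int)) := by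
  induction ts with
  | nil => intro s; simp [PySem.List.enumerate_nil]
  | cons t rest ih =>
    intro s
    rw [PySem.List.enumerate_cons, List.filter_cons, List.findIdx?_cons]
    by_cases h : PySem.Str.len t = 1
    · rw [if_pos (by simpa using h), if_pos (by simpa using h), List.map_cons, List.head?_cons]
      simp
    · rw [if_neg (by simpa using h), if_neg (by simpa using h), ih]
      cases hf : rest.findIdx? (fun t => decide (PySem.Str.len t = 1)) with
      | none => simp
      | some j => simp only [Option.map_some]; congr 1; push_cast; ring

lemma seps_getLast (ts : List String) : ∀ s : Int,
    (((PySem.List.enumerate ts s).filter (fun p => decide (PySem.Str.len p.2 = 1))).map Prod.fst).getLast?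
      = (ts.reverse.findIdx? (fun t => decide (PySem.Str.len t = 1))).map
          (fun j : Nat => s + ((ts.length : Int) - 1 - (j : Int))) := by
  induction ts using List.reverseRecOn with
  | nil => intro s; simp [PySem.List.enumerate_nil]
  | append_singleton xs x ih =>
    intro s
    rw [PySem.List.enumerate_append, List.filter_append, List.map_append, List.reverse_append,
      List.reverse_singleton, List.singleton_append, List.findIdx?_cons]
    by_cases h : PySem.Str.len x = 1
    · rw [if_pos (by simpa using h)]
      simp only [PySem.List.enumerate_cons, PySem.List.enumerate_nil, List.filter_cons,
        List.filter_nil]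
      rw [if_pos (by simpa using h)]
      simp only [List.map_cons, List.map_nil, List.getLast?_concat, Option.map_some]
      congr 1
      simp only [List.length_append, List.length_singleton]
      push_cast; ring
    · rw [if_neg (by simpa using h)]
      simp only [PySem.List.enumerate_cons, PySem.List.enumerate_nil, List.filter_cons,
        List.filter_nil]
      rw [if_neg (by simpa using h), List.map_nil, List.append_nil, ih]
      cases hf : xs.reverse.findIdx? (fun t => decide (PySem.Str.len t = 1)) with
      | none => simp
      | some j =>
        simp only [Option.map_some]; congr 1
        simp only [List.length_append, List.length_singleton]
        push_cast; ring

theorem extract_types_spec_aux (type_line : String) (secondary : Bool) :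
    extract_types type_line secondary = extract_types_alt type_line secondary := by
  unfold extract_types extract_types_alt
  set ts := (PySem.Str.split? type_line " ").getD [] with hts
  cases secondary with
  | false =>
    simp only [Bool.false_eq_true, if_false, extractTypesLoopA_eq, seps_head ts 0]
    cases hf : ts.findIdx? (fun t => decide (PySem.Str.len t = 1)) with
    | none => simp
    | some i =>
      simp only [Option.map_some, List.nil_append]
      have : (0 : Int) + (i : Int) = ((i : Nat) : Int) := by ring
      rw [this, PySem.List.slice_to_natCast]
  | true =>
    simp only [if_true, extractTypesLoopA_eq, seps_getLast ts 0]
    cases hf : ts.reverse.findIdx? (fun t => decide (PySem.Str.len t = 1)) with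
    | none => simp
    | some j =>
      have hj : j < ts.length := by
        have := List.findIdx?_eq_some_iff_findIdx_eq.mp hf
        simpa using this.1
      simp only [Option.map_some, List.nil_append]
      have hidx : (0 : Int) + ((ts.length : Int) - 1 - (j : Int)) + 1
          = ((ts.length - j : Nat) : Int) := by rw [Nat.cast_sub hj.le]; ring
      rw [hidx, PySem.List.slice_from_natCast, List.take_reverse]

-- ===== VERDICT (by name: the statement is the Claim_ definition above) =====
theorem extract_types_spec : Claim_equal_extract_types := by
  intro type_line secondary _
  unfold Spec_extract_types
  exact extract_types_spec_aux type_line secondary
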